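-- pv_equiv track=rewrite | github.com/ceubanks/Leetcode-Solutions | Templates/sliding_window.py | fixed_size_window
-- ===== SOURCE A (Python) =====
-- from typing import List, Dict, Any
--
-- def fixed_size_window(arr: List[Any], k: int) -> List[Any]:
--     """
--     Template for fixed-size sliding window problems.
--
--     Args:
--         arr: Input array/string
--         k: Size of the window
--
--     Returns:
--         List containing results for each valid window
--
--     Time Complexity: O(n)
--     Space Complexity: O(1)
--     """
--     if not arr or k <= 0:
--         return []
--
--     window_start = 0
--     results = []
--     current_window = []  # Or use other data structure based on problem
--
--     for window_end in range(len(arr)):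
--         # 1. Add element to window
--         current_window.append(arr[window_end])
--
--         # 2. If window size equals k, process window and slide
--         if window_end >= k - 1:
--             results.append(current_window.copy())  # Or process window differently
--             current_window.remove(arr[window_start])
--             window_start += 1
--
--     return results
-- ===== SOURCE B (Python) =====
-- def fixed_size_window(arr, k):
--     if not arr or k <= 0:
--         return []
--     return [arr[start:start + k] for start in range(len(arr) - k + 1)]
-- ===== Notes on version B (the rewrite author's own statement) =====
-- stated objective: simpler
-- what changed: Replaces the maintained mutable window (append, positional remove, moving start pointer) with direct per-start slicing: each window arr[start:start+k] is computed independently from its start index, in one comprehension.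
import Mathlib
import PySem

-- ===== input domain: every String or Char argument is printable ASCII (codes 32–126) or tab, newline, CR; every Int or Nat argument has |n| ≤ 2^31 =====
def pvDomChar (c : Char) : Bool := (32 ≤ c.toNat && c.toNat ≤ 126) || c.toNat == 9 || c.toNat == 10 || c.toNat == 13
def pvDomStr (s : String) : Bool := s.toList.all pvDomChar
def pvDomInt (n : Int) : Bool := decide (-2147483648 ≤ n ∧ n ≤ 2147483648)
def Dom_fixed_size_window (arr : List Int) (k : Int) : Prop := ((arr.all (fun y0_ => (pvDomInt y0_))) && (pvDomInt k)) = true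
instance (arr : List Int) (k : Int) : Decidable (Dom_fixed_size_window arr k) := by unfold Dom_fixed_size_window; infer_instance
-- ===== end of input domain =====

-- B replaces A's maintained mutable window (append / positional remove / moving start
-- pointer) with direct per-start slicing arr[start:start+k]; objective: simpler, not faster.

-- ===== PORT A =====
-- loop body of A (one step of the for-loop over window_end)
def fswStep (arr : List Int) (k : Int) (s : Int × List (List Int) × List Int)
    (we : Int) : Int × List (List Int) × List Int :=
  let cw := s.2.2 ++ [PySem.List.pyGetD arr we 0]
  if we ≥ k - 1 then
    (s.1 + 1, s.2.1 ++ [cw],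
     (PySem.List.remove? cw (PySem.List.pyGetD arr s.1 0)).getD cw)
  else (s.1, s.2.1, cw)

-- A: thread a mutable window through the loop: append arr[we], and once full,
-- record a copy and remove the start element.  State = (window_start, results, current_window).
def fixed_size_window (arr : List Int) (k : Int) : List (List Int) :=
  if arr = [] ∨ k ≤ 0 then []
  else
    let st : Int × List (List Int) × List Int :=
      (PySem.List.pyRange 0 (arr.length : Int) 1).foldl (fswStep arr k) (0, [], [])
    st.2.1

-- ===== PORT B =====
-- B: each window is the slice arr[start:start+k], computed independently per start index.
def fixed_size_window_alt (arr : List Int) (k : Int) : List (List Int) :=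
  if arr = [] ∨ k ≤ 0 then []
  else
    (PySem.List.pyRange 0 ((arr.length : Int) - k + 1) 1).map
      (fun start => PySem.List.slice arr (some start) (some (start + k)))

-- ===== PRECONDITION & SPEC =====
def Spec_fixed_size_window (arr : List Int) (k : Int) (out : List (List Int)) : Prop := out = fixed_size_window_alt arr k
instance (arr : List Int) (k : Int) (out : List (List Int)) : Decidable (Spec_fixed_size_window arr k out) := by unfold Spec_fixed_size_window; infer_instance

-- ===== CLAIM (what is proved, stated in full; the proofs are below) =====
def Claim_equal_fixed_size_window : Prop := ∀ (arr : List Int) (k : Int), Dom_fixed_size_window arr k → Spec_fixed_size_window arr k (fixed_size_window arr k)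

-- ===== LEMMAS AND PROOFS =====

-- Invariant of A's loop: after processing indices 0..m-1, window_start is m+1-K (Nat-truncated),
-- results holds the slices starting at 0..m-K, and current_window is arr[m+1-K : m].
theorem fsw_inv (arr : List Int) (K : Nat) (hK1 : 1 ≤ K) (m : Nat) (hm : m ≤ arr.length) :
    (PySem.List.pyRange 0 (m : Int) 1).foldl (fswStep arr (K : Int)) (0, [], []) =
      (((m + 1 - K : Nat) : Int),
       (List.range (m + 1 - K)).map (fun s => (arr.drop s).take K),
       (arr.drop (m + 1 - K)).take (m - (m + 1 - K))) := by
  induction m with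
  | zero =>
    simp [PySem.List.pyRange_one_eq_nil, Nat.sub_eq_zero_of_le hK1]
  | succ m ih =>
    have hmn : m < arr.length := by omega
    have h1 : ((m + 1 : Nat) : Int) = (m : Int) + 1 := by push_cast; ring
    rw [h1, PySem.List.pyRange_one_succ_right (a := 0) (b := (m : Int)) (by omega),
        List.foldl_append, ih (by omega)]
    simp only [List.foldl_cons, List.foldl_nil]
    have hcw : (arr.drop (m + 1 - K)).take (m - (m + 1 - K)) ++ [PySem.List.pyGetD arr (m : Int) 0]
        = (arr.drop (m + 1 - K)).take (m + 1 - (m + 1 - K)) := by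
      have hj : m - (m + 1 - K) < (arr.drop (m + 1 - K)).length := by
        rw [List.length_drop]; omega
      rw [PySem.List.pyGetD_natCast, List.getD_eq_getElem arr 0 hmn,
          show m + 1 - (m + 1 - K) = (m - (m + 1 - K)) + 1 from by omega,
          List.take_succ, List.getElem?_eq_getElem hj]
      simp only [List.getElem_drop, Option.toList_some]
      have : m + 1 - K + (m - (m + 1 - K)) = m := by omega
      simp [this]
    by_cases hbr : K ≤ m + 1
    · have hw : m + 1 + 1 - K = (m + 1 - K) + 1 := by omega
      have hwn : m + 1 - K < arr.length := by omega
      unfold fswStep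
      simp only [if_pos (show ((m : Int)) ≥ ((K : Int) - 1) from by push_cast; omega), hcw]
      simp only [Prod.mk.injEq]
      refine ⟨by omega, ?_, ?_⟩
      · rw [hw, List.range_succ, List.map_append,
            show m + 1 - (m + 1 - K) = K from by omega]
        simp
      · rw [show m + 1 - (m + 1 - K) = K from by omega]
        obtain ⟨K', rfl⟩ : ∃ K', K = K' + 1 := ⟨K - 1, by omega⟩
        rw [PySem.List.pyGetD_natCast, List.getD_eq_getElem arr 0 hwn,
            List.drop_eq_getElem_cons hwn, List.take_succ_cons]
        simp only [PySem.List.remove?_cons_self, Option.getD_some]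
        rw [show m + 1 + 1 - (K' + 1) = (m + 1 - (K' + 1)) + 1 from by omega,
            show m + 1 - ((m + 1 - (K' + 1)) + 1) = K' from by omega]
    · have h0 : m + 1 - K = 0 := by omega
      have h0' : m + 1 + 1 - K = 0 := by omega
      unfold fswStep
      simp only [if_neg (show ¬ ((m : Int)) ≥ ((K : Int) - 1) from by push_cast; omega)]
      simp only [h0, h0', Nat.sub_zero, List.drop_zero, Nat.cast_zero,
        List.range_zero, List.map_nil]
      simp only [h0, Nat.sub_zero, List.drop_zero] at hcw
      rw [hcw]

-- ===== VERDICT (by name: the statement is the Claim_ definition above) =====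
theorem fixed_size_window_spec : Claim_equal_fixed_size_window := by
  intro arr k _
  unfold Spec_fixed_size_window fixed_size_window fixed_size_window_alt
  by_cases hg : arr = [] ∨ k ≤ 0
  · simp [hg]
  · push_neg at hg
    obtain ⟨hne, hk⟩ := hg
    have hK : k = ((k.toNat : Nat) : Int) := by omega
    rw [if_neg (by push_neg; exact ⟨hne, hk⟩), if_neg (by push_neg; exact ⟨hne, hk⟩)]
    rw [hK, fsw_inv arr k.toNat (by omega) arr.length le_rfl]
    rw [PySem.List.pyRange_one]
    have hlen : (((arr.length : Int) - (k.toNat : Int) + 1) - 0).toNat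
        = arr.length + 1 - k.toNat := by omega
    rw [hlen]
    simp only [List.map_map]
    apply List.map_congr_left
    intro j hj
    have hjlt : j < arr.length + 1 - k.toNat := List.mem_range.mp hj
    simp only [Function.comp_apply, zero_add]
    exact (PySem.List.slice_natCast_add arr j k.toNat).symm
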